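-- pv_equiv track=rewrite | github.com/NOIZYLAB-io/NOIZYLAB | dns-security-manager.py | generate_combined_spf
-- ===== SOURCE A (Python) =====
-- from typing import Dict, List
--
-- def generate_combined_spf(domain: str, providers: List[str]) -> str:
--     """Generate combined SPF for multiple providers"""
--     includes = []
--
--     if "outlook" in providers or "microsoft" in providers or "office365" in providers:
--         includes.append("spf.protection.outlook.com")
--
--     if "google" in providers or "gmail" in providers:
--         includes.append("_spf.google.com")
--
--     if "sendgrid" in providers:
--         includes.append("sendgrid.net")
--
--     if "mailchimp" in providers:
--         includes.append("servers.mcsv.net")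
--
--     parts = ["v=spf1"]
--     for include in includes:
--         parts.append(f"include:{include}")
--     parts.append("-all")
--
--     return " ".join(parts)
-- ===== SOURCE B (Python) =====
-- from typing import Dict, List
--
-- _KEYWORD_TO_INCLUDE = {
--     "outlook": "spf.protection.outlook.com",
--     "microsoft": "spf.protection.outlook.com",
--     "office365": "spf.protection.outlook.com",
--     "google": "_spf.google.com",
--     "gmail": "_spf.google.com",
--     "sendgrid": "sendgrid.net",
--     "mailchimp": "servers.mcsv.net",
-- }
-- _INCLUDE_ORDER = ["spf.protection.outlook.com", "_spf.google.com",
--                   "sendgrid.net", "servers.mcsv.net"]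
--
-- def generate_combined_spf(domain: str, providers: List[str]) -> str:
--     """Generate combined SPF for multiple providers (single pass + hash index)."""
--     hit = set()
--     for p in providers:
--         inc = _KEYWORD_TO_INCLUDE.get(p)
--         if inc is not None:
--             hit.add(inc)
--     return " ".join(["v=spf1"]
--                     + ["include:" + inc for inc in _INCLUDE_ORDER if inc in hit]
--                     + ["-all"])
-- ===== Notes on version B (the rewrite author's own statement) =====
-- stated objective: alternative
-- what changed: Instead of testing seven fixed keywords against the providers list (up to seven scans of providers), B makes ONE pass over providers, mapping each element through a keyword->include hash table into a set of triggered includes, then emits the hit includes in canonical order; the per-keyword membership scans of A disappear.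
import Mathlib
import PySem

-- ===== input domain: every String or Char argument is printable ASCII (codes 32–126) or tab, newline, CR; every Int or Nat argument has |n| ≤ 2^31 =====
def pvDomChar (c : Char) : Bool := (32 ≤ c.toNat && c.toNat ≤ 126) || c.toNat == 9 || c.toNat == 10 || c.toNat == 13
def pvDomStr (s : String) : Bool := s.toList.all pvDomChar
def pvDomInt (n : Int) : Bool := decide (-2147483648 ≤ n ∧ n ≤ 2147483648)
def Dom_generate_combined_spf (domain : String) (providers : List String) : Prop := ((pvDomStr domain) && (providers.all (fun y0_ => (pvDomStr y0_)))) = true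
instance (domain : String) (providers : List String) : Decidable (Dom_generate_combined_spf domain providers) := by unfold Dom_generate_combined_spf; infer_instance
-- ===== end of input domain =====

-- ===== PORT A =====
-- A builds `includes` with four membership-tested appends, then joins.
def generate_combined_spf (domain : String) (providers : List String) : String :=
  let includes : List String := []
  let includes := if providers.contains "outlook" || providers.contains "microsoft" || providers.contains "office365" then includes ++ ["spf.protection.outlook.com"] else includes
  let includes := if providers.contains "google" || providers.contains "gmail" then includes ++ ["_spf.google.com"] else includes
  let includes := if providers.contains "sendgrid" then includes ++ ["sendgrid.net"] else includes
  let includes := if providers.contains "mailchimp" then includes ++ ["servers.mcsv.net"] else includes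
  let parts := includes.foldl (fun acc inc => acc ++ ["include:" ++ inc]) ["v=spf1"]
  let parts := parts ++ ["-all"]
  PySem.Str.join " " parts

-- ===== PORT B =====
-- B: ONE pass over providers through a keyword→include dict into a set of
-- triggered includes, then the hit includes are emitted in canonical order.
def kwToInclude : PySem.Dict String String :=
  PySem.Dict.ofList
  [("outlook", "spf.protection.outlook.com"),
   ("microsoft", "spf.protection.outlook.com"),
   ("office365", "spf.protection.outlook.com"),
   ("google", "_spf.google.com"),
   ("gmail", "_spf.google.com"),
   ("sendgrid", "sendgrid.net"),
   ("mailchimp", "servers.mcsv.net")]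

def includeOrder : List String :=
  ["spf.protection.outlook.com", "_spf.google.com", "sendgrid.net", "servers.mcsv.net"]

def generate_combined_spf_alt (domain : String) (providers : List String) : String :=
  let hit : PySem.Set String :=
    providers.foldl
      (fun s p =>
        match PySem.Dict.get? kwToInclude p with
        | some inc => PySem.Set.add s inc
        | none => s)
      PySem.Set.empty
  PySem.Str.join " " (["v=spf1"]
    ++ ((includeOrder.filter (fun inc => PySem.Set.contains hit inc)).map (fun inc => "include:" ++ inc))
    ++ ["-all"])

-- ===== PRECONDITION & SPEC =====
def Spec_generate_combined_spf (domain : String) (providers : List String) (out : String) : Prop := out = generate_combined_spf_alt domain providers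
instance (domain : String) (providers : List String) (out : String) : Decidable (Spec_generate_combined_spf domain providers out) := by unfold Spec_generate_combined_spf; infer_instance

-- ===== CLAIM =====
def Claim_equal_generate_combined_spf : Prop := ∀ (domain : String) (providers : List String), Dom_generate_combined_spf domain providers → Spec_generate_combined_spf domain providers (generate_combined_spf domain providers)

-- ===== LEMMAS AND PROOFS =====

-- membership in the folded hit-set: inc is hit iff some provider maps to it
lemma mem_hit_fold (providers : List String) (s : PySem.Set String) (inc : String) :
    (inc ∈ providers.foldl
      (fun s p =>
        match PySem.Dict.get? kwToInclude p with
        | some i => PySem.Set.add s i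
        | none => s) s)
    ↔ inc ∈ s ∨ providers.any (fun p => PySem.Dict.get? kwToInclude p == some inc) := by
  induction providers generalizing s with
  | nil => simp
  | cons p ps ih =>
    simp only [List.foldl_cons, List.any_cons, ih]
    cases h : PySem.Dict.get? kwToInclude p with
    | none => simp
    | some i =>
      simp [PySem.Set.mem_add]
      tauto

lemma kw_mk : kwToInclude = PySem.Dict.mk
    [("outlook", "spf.protection.outlook.com"),
     ("microsoft", "spf.protection.outlook.com"),
     ("office365", "spf.protection.outlook.com"),
     ("google", "_spf.google.com"),
     ("gmail", "_spf.google.com"),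
     ("sendgrid", "sendgrid.net"),
     ("mailchimp", "servers.mcsv.net")] := by decide

lemma lookup_outlook (p : String) :
    (PySem.Dict.get? kwToInclude p == some "spf.protection.outlook.com")
    = (p == "outlook" || p == "microsoft" || p == "office365") := by
  rw [kw_mk]
  simp only [PySem.Dict.get?_mk_cons, beq_iff_eq]
  split_ifs with h1 h2 h3 h4 h5 h6 h7
  · subst h1; decide
  · subst h2; decide
  · subst h3; decide
  · subst h4; decide
  · subst h5; decide
  · subst h6; decide
  · subst h7; decide
  · simp [show ∀ q, (PySem.Dict.mk ([] : List (String × String))).get? q = none from fun _ => rfl,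
      Ne.symm h1, Ne.symm h2, Ne.symm h3]

lemma lookup_google (p : String) :
    (PySem.Dict.get? kwToInclude p == some "_spf.google.com")
    = (p == "google" || p == "gmail") := by
  rw [kw_mk]
  simp only [PySem.Dict.get?_mk_cons, beq_iff_eq]
  split_ifs with h1 h2 h3 h4 h5 h6 h7
  · subst h1; decide
  · subst h2; decide
  · subst h3; decide
  · subst h4; decide
  · subst h5; decide
  · subst h6; decide
  · subst h7; decide
  · simp [show ∀ q, (PySem.Dict.mk ([] : List (String × String))).get? q = none from fun _ => rfl,
      Ne.symm h4, Ne.symm h5]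

lemma lookup_sendgrid (p : String) :
    (PySem.Dict.get? kwToInclude p == some "sendgrid.net") = (p == "sendgrid") := by
  rw [kw_mk]
  simp only [PySem.Dict.get?_mk_cons, beq_iff_eq]
  split_ifs with h1 h2 h3 h4 h5 h6 h7
  · subst h1; decide
  · subst h2; decide
  · subst h3; decide
  · subst h4; decide
  · subst h5; decide
  · subst h6; decide
  · subst h7; decide
  · simp [show ∀ q, (PySem.Dict.mk ([] : List (String × String))).get? q = none from fun _ => rfl,
      Ne.symm h6]

lemma lookup_mailchimp (p : String) :
    (PySem.Dict.get? kwToInclude p == some "servers.mcsv.net") = (p == "mailchimp") := by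
  rw [kw_mk]
  simp only [PySem.Dict.get?_mk_cons, beq_iff_eq]
  split_ifs with h1 h2 h3 h4 h5 h6 h7
  · subst h1; decide
  · subst h2; decide
  · subst h3; decide
  · subst h4; decide
  · subst h5; decide
  · subst h6; decide
  · subst h7; decide
  · simp [show ∀ q, (PySem.Dict.mk ([] : List (String × String))).get? q = none from fun _ => rfl,
      Ne.symm h7]

lemma hit_contains (providers : List String) (inc : String) :
    PySem.Set.contains
      (providers.foldl
        (fun s p =>
          match PySem.Dict.get? kwToInclude p with
          | some i => PySem.Set.add s i
          | none => s) PySem.Set.empty) inc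
    = providers.any (fun p => PySem.Dict.get? kwToInclude p == some inc) := by
  rw [Bool.eq_iff_iff]
  rw [PySem.Set.contains_iff, mem_hit_fold]
  simp [PySem.Set.empty]

lemma any_eq_or (providers : List String) (f g : String → Bool) :
    providers.any (fun p => f p || g p) = (providers.any f || providers.any g) := by
  induction providers with
  | nil => rfl
  | cons p ps ih => simp [List.any_cons, ih]; ac_rfl

-- ===== VERDICT =====
theorem generate_combined_spf_spec : Claim_equal_generate_combined_spf := by
  intro domain providers _
  unfold Spec_generate_combined_spf generate_combined_spf generate_combined_spf_alt includeOrder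
  simp only [hit_contains, List.filter_cons, List.filter_nil]
  rw [show (fun p => PySem.Dict.get? kwToInclude p == some "spf.protection.outlook.com")
        = fun p => p == "outlook" || p == "microsoft" || p == "office365" from funext lookup_outlook,
      show (fun p => PySem.Dict.get? kwToInclude p == some "_spf.google.com")
        = fun p => p == "google" || p == "gmail" from funext lookup_google,
      show (fun p => PySem.Dict.get? kwToInclude p == some "sendgrid.net")
        = fun p => p == "sendgrid" from funext lookup_sendgrid,
      show (fun p => PySem.Dict.get? kwToInclude p == some "servers.mcsv.net")
        = fun p => p == "mailchimp" from funext lookup_mailchimp]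
  simp only [any_eq_or]
  have hc : ∀ k : String, providers.any (fun p => p == k) = providers.contains k := by
    intro k; induction providers with
    | nil => rfl
    | cons p ps ih => rw [Bool.eq_iff_iff]; simp [List.any_beq, BEq.comm]
  simp only [hc]
  cases providers.contains "outlook" <;> cases providers.contains "microsoft" <;>
    cases providers.contains "office365" <;> cases providers.contains "google" <;>
    cases providers.contains "gmail" <;> cases providers.contains "sendgrid" <;>
    cases providers.contains "mailchimp" <;> simp
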